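-- pv_equiv track=rewrite | github.com/darrenjedwards/spdp-observer-p-vs-np | spdp_rank_perm3x3_strong.py | derivative_multi
-- ===== SOURCE A (Python) =====
-- def derivative(p, var_idx):
--     res = {}
--     for m, c in p.items():
--         if m[var_idx]:
--             new = list(m)
--             new[var_idx] -= 1
--             res[tuple(new)] = res.get(tuple(new), 0) + c * m[var_idx]
--     return res
--
-- def derivative_multi(p, multi):
--     res = p
--     for idx, times in enumerate(multi):
--         for _ in range(times):
--             res = derivative(res, idx)
--             if not res:
--                 return {}
--     return res
-- ===== SOURCE B (Python) =====
-- def derivative_multi(p, multi):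
--     res = {}
--     for m, c in p.items():
--         new = list(m)
--         factor = 1
--         dead = False
--         for idx, times in enumerate(multi):
--             if times <= 0:
--                 continue
--             e = new[idx]
--             if 0 <= e < times:
--                 dead = True
--                 break
--             f = 1
--             for k in range(times):
--                 f *= e - k
--             factor *= f
--             new[idx] = e - times
--         if not dead:
--             key = tuple(new)
--             res[key] = res.get(key, 0) + c * factor
--     return res
-- ===== Notes on version B (the rewrite author's own statement) =====
-- stated objective: alternative
-- what changed: Instead of rebuilding the whole term dict once per single derivative (sum(multi) passes with list/tuple key conversions and dict merges in each), B makes one pass over the terms and, per term, multiplies the coefficient by the falling factorial of each exponent and subtracts the exponents directly, dropping a term as soon as an exponent dies.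
-- outside the precondition, e.g. on derivative_multi({(0,): 1}, [1, 1]): A returns {}, B returns {}
import Mathlib
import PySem

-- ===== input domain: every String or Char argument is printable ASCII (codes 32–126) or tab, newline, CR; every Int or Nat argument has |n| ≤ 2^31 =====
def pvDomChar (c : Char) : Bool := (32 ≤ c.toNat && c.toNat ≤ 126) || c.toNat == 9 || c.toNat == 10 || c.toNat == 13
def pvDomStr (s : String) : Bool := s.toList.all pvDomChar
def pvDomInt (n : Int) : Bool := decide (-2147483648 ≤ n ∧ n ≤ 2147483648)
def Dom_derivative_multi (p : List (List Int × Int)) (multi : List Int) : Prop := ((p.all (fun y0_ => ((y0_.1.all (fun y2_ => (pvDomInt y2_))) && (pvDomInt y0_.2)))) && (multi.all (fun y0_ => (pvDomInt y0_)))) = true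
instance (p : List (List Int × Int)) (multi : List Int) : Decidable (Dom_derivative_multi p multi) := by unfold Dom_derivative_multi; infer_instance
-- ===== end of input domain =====

-- B re-implements the repeated partial derivative in ONE pass over the terms (falling factorials per variable)
-- instead of A's one full dict rebuild per single derivative; equivalence is about the return value.

-- ===== PORT A =====
-- helper `derivative(p, var_idx)` of A
def pvDerivA (d : PySem.Dict (List Int) Int) (varIdx : Int) : PySem.Dict (List Int) Int :=
  d.items.foldl (fun res mc =>
    let e := PySem.List.pyGetD mc.1 varIdx 0
    if e ≠ 0 then
      let new := PySem.List.pySetD mc.1 varIdx (e - 1)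
      res.insert new (res.getD new 0 + mc.2 * e)
    else res) PySem.Dict.empty

-- `for _ in range(times): res = derivative(res, idx); if not res: return {}` — none = the early `return {}`
def pvInnerA (i : Int) : Nat → PySem.Dict (List Int) Int → Option (PySem.Dict (List Int) Int)
  | 0, res => some res
  | t + 1, res =>
    let r := pvDerivA res i
    if r.items.isEmpty then none else pvInnerA i t r

-- `for idx, times in enumerate(multi): …`
def pvOuterA : List (Int × Int) → PySem.Dict (List Int) Int → PySem.Dict (List Int) Int
  | [], res => res
  | (idx, times) :: rest, res =>
    match pvInnerA idx times.toNat res with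
    | none => PySem.Dict.empty
    | some r => pvOuterA rest r

def derivative_multi (p : List (List Int × Int)) (multi : List Int) : List (List Int × Int) :=
  (pvOuterA (PySem.List.enumerate multi) (PySem.Dict.mk p)).items

-- ===== PORT B =====
-- `f = 1; for k in range(times): f *= e - k`
def pvFF (e : Int) (times : Int) : Int :=
  (PySem.List.pyRange 0 times 1).foldl (fun f k => f * (e - k)) 1

-- B's inner loop over enumerate(multi): state = (new, factor); none = `dead = True; break`
def pvTermB : List (Int × Int) → List Int → Int → Option (List Int × Int)
  | [], new, factor => some (new, factor)
  | (idx, times) :: rest, new, factor =>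
    if times ≤ 0 then pvTermB rest new factor
    else
      let e := PySem.List.pyGetD new idx 0
      if 0 ≤ e ∧ e < times then none
      else pvTermB rest (PySem.List.pySetD new idx (e - times)) (factor * pvFF e times)

def derivative_multi_alt (p : List (List Int × Int)) (multi : List Int) : List (List Int × Int) :=
  (p.foldl (fun res mc =>
    match pvTermB (PySem.List.enumerate multi) mc.1 1 with
    | none => res
    | some nf => res.insert nf.1 (res.getD nf.1 0 + mc.2 * nf.2)) PySem.Dict.empty).items

-- ===== PRECONDITION & SPEC =====
-- Pre_ excludes (a) association lists with duplicate keys, which no Python dict argument can produce, and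
-- (b) inputs where some positive multi entry indexes beyond the end of some monomial: there A raises
-- IndexError, except in the rare case that every term dies at an earlier variable (both return {}; see cite).
def Pre_derivative_multi (p : List (List Int × Int)) (multi : List Int) : Prop :=
  (p.map Prod.fst).Nodup ∧ ∀ mc ∈ p, ∀ k < multi.length, 0 < multi.getD k 0 → k < mc.1.length
instance (p : List (List Int × Int)) (multi : List Int) : Decidable (Pre_derivative_multi p multi) := by
  unfold Pre_derivative_multi; infer_instance

def pvWitness_derivative_multi : (List (List Int × Int)) × List Int := ([([2, 1], 3)], [1, 0])

def Spec_derivative_multi (p : List (List Int × Int)) (multi : List Int) (out : List (List Int × Int)) : Prop := out = derivative_multi_alt p multi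
instance (p : List (List Int × Int)) (multi : List Int) (out : List (List Int × Int)) : Decidable (Spec_derivative_multi p multi out) := by unfold Spec_derivative_multi; infer_instance

-- ===== CLAIM (what is proved, stated in full; the proofs are below) =====
def Claim_equal_derivative_multi : Prop := ∀ (p : List (List Int × Int)) (multi : List Int), Dom_derivative_multi p multi → Pre_derivative_multi p multi → Spec_derivative_multi p multi (derivative_multi p multi)

-- ===== LEMMAS AND PROOFS =====

-- falling factorial e·(e-1)⋯(e-T+1), accumulated left to right
def pvFFN (e : Int) : Nat → Int
  | 0 => 1
  | T + 1 => pvFFN e T * (e - (T : Int))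

-- the effect of `times = T` derivatives at index j on a single term
def pvStep (j T : Nat) (m : List Int) (c : Int) : Option (List Int × Int) :=
  if 0 ≤ m.getD j 0 ∧ m.getD j 0 < (T : Int) then none
  else some (m.set j (m.getD j 0 - (T : Int)), c * pvFFN (m.getD j 0) T)

-- the effect of the whole multi-index on a single term
def pvTerm : List (Nat × Nat) → List Int → Int → Option (List Int × Int)
  | [], m, c => some (m, c)
  | (j, T) :: rest, m, c => (pvStep j T m c).bind fun nd => pvTerm rest nd.1 nd.2

def pvUnstep (j T : Nat) (n : List Int) : List Int := n.set j (n.getD j 0 + (T : Int))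

def pvUnterm : List (Nat × Nat) → List Int → List Int
  | [], n => n
  | (j, T) :: rest, n => pvUnstep j T (pvUnterm rest n)

lemma pv_set_getD_self (xs : List Int) (j : Nat) : xs.set j (xs.getD j 0) = xs := by
  rcases Nat.lt_or_ge j xs.length with h | h
  · simp [List.getD, List.getElem?_eq_getElem h]
  · exact List.set_eq_of_length_le h

lemma pv_getD_set_self (xs : List Int) (j : Nat) (v : Int) (h : j < xs.length) :
    (xs.set j v).getD j 0 = v := by
  simp [List.getD, h]

lemma pvStep_inverse {j T : Nat} {m : List Int} {c : Int} {n : List Int} {d : Int}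
    (h : pvStep j T m c = some (n, d)) : pvUnstep j T n = m := by
  unfold pvStep at h
  split_ifs at h with hc
  simp only [Option.some.injEq, Prod.mk.injEq] at h
  obtain ⟨h1, _⟩ := h
  subst h1
  unfold pvUnstep
  rcases Nat.lt_or_ge j m.length with hl | hl
  · rw [pv_getD_set_self _ _ _ (by simpa using hl), List.set_set]
    have : m.getD j 0 - (T : Int) + (T : Int) = m.getD j 0 := by ring
    rw [this, pv_set_getD_self]
  · rw [List.set_eq_of_length_le hl]
    exact List.set_eq_of_length_le hl

lemma pvTerm_inverse {l : List (Nat × Nat)} {m : List Int} {c : Int} {n : List Int} {d : Int}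
    (h : pvTerm l m c = some (n, d)) : pvUnterm l n = m := by
  induction l generalizing m c with
  | nil =>
    simp only [pvTerm, Option.some.injEq, Prod.mk.injEq] at h
    obtain ⟨h1, _⟩ := h
    simpa [pvUnterm] using h1.symm
  | cons x rest ih =>
    obtain ⟨j, T⟩ := x
    simp only [pvTerm] at h
    cases hs : pvStep j T m c with
    | none => rw [hs] at h; simp at h
    | some nd =>
      obtain ⟨n1, d1⟩ := nd
      rw [hs, Option.bind_some] at h
      show pvUnstep j T (pvUnterm rest n) = m
      rw [ih h]
      exact pvStep_inverse hs

lemma pvFilterMap_keys_nodup (f : List Int → Int → Option (List Int × Int)) (g : List Int → List Int)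
    (hg : ∀ m c n v, f m c = some (n, v) → g n = m) :
    ∀ (q : List (List Int × Int)), (q.map Prod.fst).Nodup →
    ((q.filterMap (fun mc => f mc.1 mc.2)).map Prod.fst).Nodup := by
  intro q
  induction q with
  | nil => simp
  | cons mc rest ih =>
    intro h
    simp only [List.map_cons, List.nodup_cons] at h
    obtain ⟨hm, hr⟩ := h
    cases hf : f mc.1 mc.2 with
    | none => simpa only [List.filterMap_cons, hf] using ih hr
    | some nv =>
      simp only [List.filterMap_cons, hf, List.map_cons, List.nodup_cons]
      refine ⟨?_, ih hr⟩
      intro hmem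
      rw [List.mem_map] at hmem
      obtain ⟨x, hx, hx1⟩ := hmem
      rw [List.mem_filterMap] at hx
      obtain ⟨mc', hmc', hfx⟩ := hx
      have h1 : g x.1 = mc'.1 := hg mc'.1 mc'.2 x.1 x.2 (by rw [hfx])
      have h2 : g nv.1 = mc.1 := hg mc.1 mc.2 nv.1 nv.2 (by rw [hf])
      rw [hx1, h2] at h1
      exact hm (List.mem_map.mpr ⟨mc', hmc', h1.symm⟩)

lemma pvFoldDict (f : List Int → Int → Option (List Int × Int)) (g : List Int → List Int)
    (hg : ∀ m c n v, f m c = some (n, v) → g n = m) :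
    ∀ (q : List (List Int × Int)) (d : PySem.Dict (List Int) Int),
    (q.map Prod.fst).Nodup →
    (∀ mc ∈ q, ∀ n v, f mc.1 mc.2 = some (n, v) → d.contains n = false) →
    (q.foldl (fun res mc =>
      match f mc.1 mc.2 with
      | none => res
      | some nv => res.insert nv.1 (res.getD nv.1 0 + nv.2)) d).items
    = d.items ++ q.filterMap (fun mc => f mc.1 mc.2) := by
  intro q
  induction q with
  | nil => intro d _ _; simp
  | cons mc rest ih =>
    intro d hnd hfresh
    simp only [List.map_cons, List.nodup_cons] at hnd
    obtain ⟨hm, hr⟩ := hnd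
    simp only [List.foldl_cons, List.filterMap_cons]
    cases hf : f mc.1 mc.2 with
    | none =>
      exact ih d hr (fun mc' h' => hfresh mc' (List.mem_cons_of_mem _ h'))
    | some nv =>
      obtain ⟨nk, nva⟩ := nv
      dsimp only
      have hcont : d.contains nk = false := hfresh mc (List.mem_cons_self) nk nva hf
      rw [PySem.Dict.getD_of_not_contains d 0 hcont, zero_add]
      have hfresh' : ∀ mc' ∈ rest, ∀ n v, f mc'.1 mc'.2 = some (n, v) →
          (d.insert nk nva).contains n = false := by
        intro mc' hmc' n v hfn
        rw [PySem.Dict.contains_insert]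
        have hne : (n == nk) = false := by
          rw [beq_eq_false_iff_ne]
          intro hEq
          have h1 : g n = mc'.1 := hg mc'.1 mc'.2 n v hfn
          have h2 : g nk = mc.1 := hg mc.1 mc.2 nk nva hf
          rw [hEq, h2] at h1
          exact hm (List.mem_map.mpr ⟨mc', hmc', h1.symm⟩)
        rw [hne, Bool.false_or]
        exact hfresh mc' (List.mem_cons_of_mem _ hmc') n v hfn
      rw [ih (d.insert nk nva) hr hfresh',
          PySem.Dict.items_insert_of_not_contains d nva hcont]
      simp [List.append_assoc]

lemma pvStep_zero (j : Nat) (m : List Int) (c : Int) : pvStep j 0 m c = some (m, c) := by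
  unfold pvStep
  rw [if_neg (by push_cast; omega)]
  simp only [pvFFN, Nat.cast_zero, sub_zero, mul_one, pv_set_getD_self]

lemma pvFFN_succ_left (e : Int) (T : Nat) : pvFFN e (T + 1) = e * pvFFN (e - 1) T := by
  induction T with
  | zero => simp [pvFFN]
  | succ T ih =>
    show pvFFN e (T + 1) * (e - ((T + 1 : Nat) : Int)) = e * (pvFFN (e - 1) T * (e - 1 - (T : Int)))
    rw [ih]
    push_cast
    ring

lemma pvDerivA_items (d : PySem.Dict (List Int) Int) (i : Int) (hi : 0 ≤ i)
    (hnd : (d.items.map Prod.fst).Nodup) :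
    (pvDerivA d i).items = d.items.filterMap (fun mc => pvStep i.toNat 1 mc.1 mc.2) := by
  unfold pvDerivA
  have hbody : (fun (res : PySem.Dict (List Int) Int) (mc : List Int × Int) =>
      let e := PySem.List.pyGetD mc.1 i 0
      if e ≠ 0 then
        let new := PySem.List.pySetD mc.1 i (e - 1)
        res.insert new (res.getD new 0 + mc.2 * e)
      else res)
      = (fun (res : PySem.Dict (List Int) Int) (mc : List Int × Int) =>
        match pvStep i.toNat 1 mc.1 mc.2 with
        | none => res
        | some nv => res.insert nv.1 (res.getD nv.1 0 + nv.2)) := by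
    funext res mc
    simp only [PySem.List.pyGetD_of_nonneg _ _ hi, PySem.List.pySetD_of_nonneg _ _ hi]
    unfold pvStep
    by_cases he : mc.1.getD i.toNat 0 = 0
    · rw [if_neg (by omega), if_pos (by push_cast; omega)]
    · rw [if_pos he, if_neg (by push_cast; omega)]
      have hff : pvFFN (mc.1.getD i.toNat 0) 1 = mc.1.getD i.toNat 0 := by
        simp only [pvFFN, Nat.cast_zero, sub_zero, one_mul]
      rw [hff]
      simp only [Nat.cast_one]
  rw [hbody]
  rw [pvFoldDict (fun m c => pvStep i.toNat 1 m c) (pvUnstep i.toNat 1)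
      (fun m c n v h => pvStep_inverse h) d.items PySem.Dict.empty hnd
      (fun mc _ n v _ => PySem.Dict.contains_empty n)]
  rfl

lemma pvStep_comp (j T : Nat) (m : List Int) (c : Int) :
    pvStep j (T + 1) m c = (pvStep j 1 m c).bind (fun nd => pvStep j T nd.1 nd.2) := by
  by_cases h1 : 0 ≤ m.getD j 0 ∧ m.getD j 0 < ((1 : Nat) : Int)
  · unfold pvStep
    rw [if_pos (by push_cast at h1 ⊢; omega), if_pos h1, Option.bind_none]
  · have hjl : j < m.length := by
      by_contra hge
      rw [List.getD_eq_default _ _ (Nat.le_of_not_lt hge)] at h1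
      norm_num at h1
    conv_lhs => rw [pvStep]
    conv_rhs => rw [pvStep]
    rw [if_neg h1, Option.bind_some]
    unfold pvStep
    rw [pv_getD_set_self _ _ _ hjl]
    by_cases h2 : 0 ≤ m.getD j 0 - ((1 : Nat) : Int) ∧ m.getD j 0 - ((1 : Nat) : Int) < (T : Int)
    · rw [if_pos h2, if_pos (by push_cast at h1 h2 ⊢; omega)]
    · rw [if_neg h2, if_neg (by push_cast at h1 h2 ⊢; omega)]
      rw [List.set_set]
      have hv : m.getD j 0 - ((1 : Nat) : Int) - (T : Int) = m.getD j 0 - ((T + 1 : Nat) : Int) := by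
        push_cast; ring
      have hff1 : pvFFN (m.getD j 0) 1 = m.getD j 0 := by
        simp only [pvFFN, Nat.cast_zero, sub_zero, one_mul]
      have hc : c * pvFFN (m.getD j 0) 1 * pvFFN (m.getD j 0 - ((1 : Nat) : Int)) T
          = c * pvFFN (m.getD j 0) (T + 1) := by
        rw [hff1, pvFFN_succ_left]
        simp only [Nat.cast_one]
        ring
      rw [hv, hc]

lemma pvFilterMap_step_comp (j T : Nat) (q : List (List Int × Int)) :
    q.filterMap (fun mc => pvStep j (T + 1) mc.1 mc.2)
      = (q.filterMap (fun mc => pvStep j 1 mc.1 mc.2)).filterMap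
          (fun nd => pvStep j T nd.1 nd.2) := by
  rw [List.filterMap_filterMap]
  apply List.filterMap_congr
  intro mc _
  rw [pvStep_comp]

lemma pvInnerA_char (i : Int) (hi : 0 ≤ i) :
    ∀ (T : Nat) (d : PySem.Dict (List Int) Int), (d.items.map Prod.fst).Nodup →
    (pvInnerA i T d = none ∧ d.items.filterMap (fun mc => pvStep i.toNat T mc.1 mc.2) = [])
    ∨ (∃ r, pvInnerA i T d = some r ∧
        r.items = d.items.filterMap (fun mc => pvStep i.toNat T mc.1 mc.2) ∧
        (r.items.map Prod.fst).Nodup) := by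
  intro T
  induction T with
  | zero =>
    intro d hnd
    right
    exact ⟨d, rfl, by simp [pvStep_zero], hnd⟩
  | succ T ih =>
    intro d hnd
    have hda := pvDerivA_items d i hi hnd
    have hnd1 : ((pvDerivA d i).items.map Prod.fst).Nodup := by
      rw [hda]
      exact pvFilterMap_keys_nodup (fun m c => pvStep i.toNat 1 m c) (pvUnstep i.toNat 1)
        (fun m c n v h => pvStep_inverse h) d.items hnd
    by_cases hemp : (pvDerivA d i).items.isEmpty
    · left
      constructor
      · simp [pvInnerA, hemp]
      · rw [pvFilterMap_step_comp, ← hda, List.isEmpty_iff.mp hemp]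
        rfl
    · rcases ih (pvDerivA d i) hnd1 with ⟨hnone, hemp2⟩ | ⟨r, hr, hitems, hnd2⟩
      · left
        refine ⟨?_, ?_⟩
        · simp [pvInnerA, hemp, hnone]
        · rw [pvFilterMap_step_comp, ← hda]
          exact hemp2
      · right
        exact ⟨r, by simp [pvInnerA, hemp, hr],
          by rw [pvFilterMap_step_comp, ← hda]; exact hitems, hnd2⟩

lemma pvOuterA_char :
    ∀ (l : List (Int × Int)) (d : PySem.Dict (List Int) Int),
    (∀ x ∈ l, 0 ≤ x.1) → (d.items.map Prod.fst).Nodup →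
    (pvOuterA l d).items
      = d.items.filterMap (fun mc => pvTerm (l.map (fun x => (x.1.toNat, x.2.toNat))) mc.1 mc.2) := by
  intro l
  induction l with
  | nil => intro d _ _; simp [pvOuterA, pvTerm]
  | cons x rest ih =>
    obtain ⟨iv, tv⟩ := x
    intro d hpos hnd
    have hi : 0 ≤ iv := hpos (iv, tv) (List.mem_cons_self)
    have hsplit : d.items.filterMap
        (fun mc => pvTerm (((iv, tv) :: rest).map (fun x => (x.1.toNat, x.2.toNat))) mc.1 mc.2)
        = (d.items.filterMap (fun mc => pvStep iv.toNat tv.toNat mc.1 mc.2)).filterMap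
            (fun nd => pvTerm (rest.map (fun x => (x.1.toNat, x.2.toNat))) nd.1 nd.2) := by
      rw [List.filterMap_filterMap]
      rfl
    rcases pvInnerA_char iv hi tv.toNat d hnd with ⟨hnone, hemp⟩ | ⟨r, hr, hitems, hnd2⟩
    · show (match pvInnerA iv tv.toNat d with
        | none => PySem.Dict.empty
        | some r => pvOuterA rest r).items = _
      rw [hnone, hsplit, hemp]
      rfl
    · show (match pvInnerA iv tv.toNat d with
        | none => PySem.Dict.empty
        | some r => pvOuterA rest r).items = _
      rw [hr, hsplit, ← hitems]
      exact ih r (fun x hx => hpos x (List.mem_cons_of_mem _ hx)) hnd2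

lemma pvFF_natCast (e : Int) (T : Nat) : pvFF e (T : Int) = pvFFN e T := by
  induction T with
  | zero =>
    have h0 : PySem.List.pyRange 0 ((0 : Nat) : Int) 1 = [] := by
      rw [List.eq_nil_iff_forall_not_mem]
      intro x hx
      rw [PySem.List.mem_pyRange_one] at hx
      omega
    rw [pvFF, h0]
    rfl
  | succ T ih =>
    have hstep : PySem.List.pyRange 0 ((T + 1 : Nat) : Int) 1
        = PySem.List.pyRange 0 ((T : Nat) : Int) 1 ++ [(T : Int)] := by
      have := PySem.List.pyRange_one_succ_right (a := 0) (b := (T : Int)) (by positivity)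
      push_cast
      exact this
    unfold pvFF at ih ⊢
    rw [hstep, List.foldl_append, ih]
    rfl

lemma pvFF_eq (e t : Int) : pvFF e t = pvFFN e t.toNat := by
  rcases Int.le_total t 0 with h | h
  · have h0 : PySem.List.pyRange 0 t 1 = [] := by
      rw [List.eq_nil_iff_forall_not_mem]
      intro x hx
      rw [PySem.List.mem_pyRange_one] at hx
      omega
    rw [Int.toNat_of_nonpos h]
    simp [pvFF, h0, pvFFN]
  · rw [← pvFF_natCast e t.toNat, Int.toNat_of_nonneg h]

lemma pvTermB_eq (l : List (Int × Int)) (hl : ∀ x ∈ l, 0 ≤ x.1) :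
    ∀ (m : List Int) (c : Int),
    pvTermB l m c = pvTerm (l.map (fun x => (x.1.toNat, x.2.toNat))) m c := by
  induction l with
  | nil => intro m c; rfl
  | cons x rest ih =>
    obtain ⟨iv, tv⟩ := x
    intro m c
    have hi : 0 ≤ iv := hl (iv, tv) (List.mem_cons_self)
    have hrest := fun x hx => hl x (List.mem_cons_of_mem _ hx)
    simp only [pvTermB, pvTerm, List.map_cons]
    by_cases hto : tv ≤ 0
    · rw [if_pos hto, Int.toNat_of_nonpos hto, pvStep_zero, Option.bind_some]
      exact ih hrest m c
    · rw [if_neg hto]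
      have htv : (0 : Int) < tv := by omega
      have hcast : ((tv.toNat : Nat) : Int) = tv := Int.toNat_of_nonneg htv.le
      simp only [PySem.List.pyGetD_of_nonneg _ _ hi, PySem.List.pySetD_of_nonneg _ _ hi]
      unfold pvStep
      rw [hcast]
      by_cases hd : 0 ≤ m.getD iv.toNat 0 ∧ m.getD iv.toNat 0 < tv
      · rw [if_pos hd, if_pos hd, Option.bind_none]
      · rw [if_neg hd, if_neg hd, Option.bind_some]
        rw [ih hrest, pvFF_eq]

lemma pvStep_scale (j T : Nat) (m : List Int) (a c : Int) :
    pvStep j T m (a * c) = (pvStep j T m c).map (fun nd => (nd.1, a * nd.2)) := by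
  unfold pvStep
  split_ifs
  · rfl
  · exact congrArg some (Prod.ext rfl (by ring))

lemma pvTerm_scale (l : List (Nat × Nat)) :
    ∀ (m : List Int) (a c : Int),
    pvTerm l m (a * c) = (pvTerm l m c).map (fun nd => (nd.1, a * nd.2)) := by
  induction l with
  | nil => intro m a c; rfl
  | cons x rest ih =>
    obtain ⟨j, T⟩ := x
    intro m a c
    simp only [pvTerm, pvStep_scale]
    cases hs : pvStep j T m c with
    | none => rfl
    | some nd =>
      simp only [Option.map_some, Option.bind_some]
      exact ih nd.1 a nd.2

lemma pvEnum_nonneg (multi : List Int) : ∀ x ∈ PySem.List.enumerate multi, 0 ≤ x.1 := by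
  intro x hx
  rw [PySem.List.mem_enumerate_iff] at hx
  obtain ⟨k, hk, hx⟩ := hx
  rw [hx]
  positivity

lemma pvAlt_char (p : List (List Int × Int)) (multi : List Int)
    (hnd : (p.map Prod.fst).Nodup) :
    derivative_multi_alt p multi
      = p.filterMap (fun mc =>
          pvTerm ((PySem.List.enumerate multi).map (fun x => (x.1.toNat, x.2.toNat))) mc.1 mc.2) := by
  unfold derivative_multi_alt
  have hbody : (fun (res : PySem.Dict (List Int) Int) (mc : List Int × Int) =>
      match pvTermB (PySem.List.enumerate multi) mc.1 1 with
      | none => res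
      | some nf => res.insert nf.1 (res.getD nf.1 0 + mc.2 * nf.2))
      = (fun (res : PySem.Dict (List Int) Int) (mc : List Int × Int) =>
        match (pvTerm ((PySem.List.enumerate multi).map (fun x => (x.1.toNat, x.2.toNat))) mc.1 1).map
            (fun nd => (nd.1, mc.2 * nd.2)) with
        | none => res
        | some nv => res.insert nv.1 (res.getD nv.1 0 + nv.2)) := by
    funext res mc
    rw [pvTermB_eq _ (pvEnum_nonneg multi)]
    cases pvTerm ((PySem.List.enumerate multi).map (fun x => (x.1.toNat, x.2.toNat))) mc.1 1 with
    | none => rfl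
    | some nf => rfl
  rw [hbody]
  rw [pvFoldDict
      (fun m c => (pvTerm ((PySem.List.enumerate multi).map (fun x => (x.1.toNat, x.2.toNat))) m 1).map
        (fun nd => (nd.1, c * nd.2)))
      (pvUnterm ((PySem.List.enumerate multi).map (fun x => (x.1.toNat, x.2.toNat))))
      ?hg p PySem.Dict.empty hnd (fun mc _ n v _ => PySem.Dict.contains_empty n)]
  case hg =>
    intro m c n v h
    dsimp only at h
    cases ht : pvTerm ((PySem.List.enumerate multi).map (fun x => (x.1.toNat, x.2.toNat))) m 1 with
    | none => rw [ht] at h; simp at h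
    | some nd =>
      rw [ht, Option.map_some] at h
      simp only [Option.some.injEq, Prod.mk.injEq] at h
      obtain ⟨h1, _⟩ := h
      rw [← h1]
      exact pvTerm_inverse (by rw [ht])
  show [] ++ _ = _
  rw [List.nil_append]
  apply List.filterMap_congr
  intro mc _
  rw [← pvTerm_scale]
  rw [mul_one]

lemma pvA_char (p : List (List Int × Int)) (multi : List Int)
    (hnd : (p.map Prod.fst).Nodup) :
    derivative_multi p multi
      = p.filterMap (fun mc =>
          pvTerm ((PySem.List.enumerate multi).map (fun x => (x.1.toNat, x.2.toNat))) mc.1 mc.2) := by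
  unfold derivative_multi
  exact pvOuterA_char (PySem.List.enumerate multi) (PySem.Dict.mk p)
    (pvEnum_nonneg multi) hnd

-- ===== VERDICT (by name: the statement is the Claim_ definition above) =====
theorem derivative_multi_spec : Claim_equal_derivative_multi := by
  intro p multi _hdom hpre
  unfold Spec_derivative_multi
  rw [pvA_char p multi hpre.1, pvAlt_char p multi hpre.1]
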